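-- pv_equiv track=rewrite | github.com/WangYuxuan93/CLUE | baselines/models_pytorch/processors/srl_processor.py | prepare_word_level_input
-- ===== SOURCE A (Python) =====
-- def get_word2token_map(word_ids, lengths, debug=False):
--     assert len(word_ids) == len(lengths)
--     wid2tid_list = []
--     for wids, l in zip(word_ids, lengths):
--         wid2tid = []
--         prev_word = None
--         for i, w in enumerate(wids):
--             if i >= l: break
--             if len(wid2tid) == 0 or w != prev_word:
--                 wid2tid.append([i])
--                 prev_word = w
--             else:
--                 wid2tid[-1].append(i)
--         wid2tid_list.append(wid2tid)
--         if debug: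
--             print ("wids:\n", wids)
--             print ("wid2tid:\n", wid2tid)
--     return wid2tid_list
--
-- def prepare_word_level_input(
--         attention_mask,
--         word_ids,
--         tokens,
--         debug=False
--     ):
--         #print ("attention_mask:\n", attention_mask)
--         lengths = [sum(mask) for mask in attention_mask]
--         wid2tid_list = get_word2token_map(word_ids, lengths)
--         word_lens = [len(h) for h in tokens]
--         max_word_len = max(word_lens)
--         word_masks = []
--         for word_len in word_lens:
--             word_mask = [1 for _ in range(word_len)]
--             while len(word_mask) < max_word_len:
--                 word_mask.append(0)
--             word_masks.append(word_mask)
--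
--         first_ids_list = []
--         for i, wid2tid in enumerate(wid2tid_list):
--             # rm the first [CLS] token, only takes first_ids in word len
--             first_ids = [tids[0] for tids in wid2tid[1:word_lens[i]+1]]
--             assert len(first_ids) == word_lens[i]
--             while len(first_ids) < max_word_len:
--                 first_ids.append(0)
--             first_ids_list.append(first_ids)
--
--         if debug:
--             print ("attention_mask:\n",attention_mask)
--             print ("word_ids:\n", word_ids)
--             print ("tokens:\n", tokens)
--             print ("word_lens:\n", word_lens)
--             print ("word_masks:\n", word_masks)
--             print ("first_ids_list:\n", first_ids_list)
--             exit()
--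
--         return word_masks, first_ids_list, word_lens
-- ===== SOURCE B (Python) =====
-- def prepare_word_level_input(attention_mask, word_ids, tokens, debug=False):
--     word_lens = [len(h) for h in tokens]
--     max_word_len = max(word_lens)
--     pad = lambda xs: xs + [0] * (max_word_len - len(xs))
--     word_masks = [pad([1] * wl) for wl in word_lens]
--
--     def starts(t, base):
--         # recursively split off the leading run of equal word ids;
--         # each call contributes the absolute start index of one run
--         if not t:
--             return []
--         j = 1
--         while j < len(t) and t[j] == t[0]:
--             j += 1
--         return [base] + starts(t[j:], base + j)
--
--     first_ids_list = []
--     for wl, mask, wids in zip(word_lens, attention_mask, word_ids):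
--         first_ids = starts(wids[:sum(mask)], 0)[1:wl + 1]
--         assert len(first_ids) == wl
--         first_ids_list.append(pad(first_ids))
--     return word_masks, first_ids_list, word_lens
-- ===== Notes on version B (the rewrite author's own statement) =====
-- stated objective: alternative
-- what changed: Replaced A's imperative per-token group construction (building list-of-lists word->subtoken maps by mutating the last group, then taking each group's head and while-padding) by a recursive run-splitting helper: starts(t, base) scans off the whole leading run of equal word ids at once and recurses on the remainder, yielding run-start indices directly; masks and id lists are padded by list arithmetic instead of while loops.
import Mathlib
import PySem

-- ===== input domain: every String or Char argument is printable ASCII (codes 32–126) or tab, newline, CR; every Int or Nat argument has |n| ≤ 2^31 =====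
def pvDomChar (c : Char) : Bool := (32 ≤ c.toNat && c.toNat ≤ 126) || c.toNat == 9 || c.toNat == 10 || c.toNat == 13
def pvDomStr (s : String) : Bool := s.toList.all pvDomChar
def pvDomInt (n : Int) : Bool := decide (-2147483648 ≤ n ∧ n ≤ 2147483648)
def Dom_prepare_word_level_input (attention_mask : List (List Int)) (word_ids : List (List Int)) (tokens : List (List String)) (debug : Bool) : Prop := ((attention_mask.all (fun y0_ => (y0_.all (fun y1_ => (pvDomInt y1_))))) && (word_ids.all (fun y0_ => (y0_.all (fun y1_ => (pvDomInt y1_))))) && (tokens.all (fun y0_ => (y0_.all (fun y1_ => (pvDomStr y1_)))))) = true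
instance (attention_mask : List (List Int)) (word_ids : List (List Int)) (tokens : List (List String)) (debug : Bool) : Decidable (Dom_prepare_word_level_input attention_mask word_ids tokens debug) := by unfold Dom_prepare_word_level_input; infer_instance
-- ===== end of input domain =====

-- ===== PORT A =====
-- B replaces A's imperative per-token group construction by a recursive helper
-- that splits off one whole run of equal word ids per call (objective: alternative).
-- while len(word_mask)/len(first_ids) < max_word_len: append 0   (A's padding loop)
def pvPadA (xs : List Int) (m : Int) : List Int :=
  if h : (xs.length : Int) < m then pvPadA (xs ++ [0]) m else xs
termination_by (m - xs.length).toNat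
decreasing_by simp; omega

-- inner loop of get_word2token_map over enumerate(wids) with 'if i >= l: break'
def pvGroupLoop (l : Int) : List (Int × Int) → List (List Int) → Option Int → List (List Int)
  | [], acc, _ => acc
  | (i, w) :: rest, acc, prev =>
    if l ≤ i then acc
    else if acc.isEmpty || !(some w == prev) then
      pvGroupLoop l rest (acc ++ [[i]]) (some w)
    else
      pvGroupLoop l rest (acc.dropLast ++ [(acc.getLast?.getD []) ++ [i]]) prev

def pvGetWord2tokenMap (word_ids : List (List Int)) (lengths : List Int) (_debug : Bool) : List (List (List Int)) :=
  (word_ids.zip lengths).map (fun p => pvGroupLoop p.2 (PySem.List.enumerate p.1 0) [] none)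

def prepare_word_level_input (attention_mask : List (List Int)) (word_ids : List (List Int)) (tokens : List (List String)) (debug : Bool) : List (List Int) × List (List Int) × List Int :=
  let lengths := attention_mask.map (fun mask => mask.sum)
  let wid2tid_list := pvGetWord2tokenMap word_ids lengths false
  let word_lens := tokens.map (fun h => (h.length : Int))
  let max_word_len := (PySem.List.max? word_lens (fun x => x)).getD 0
  let word_masks := word_lens.foldl (fun acc word_len =>
    acc ++ [pvPadA ((PySem.List.pyRange 0 word_len 1).map (fun _ => (1 : Int))) max_word_len]) []
  let first_ids_list := (PySem.List.enumerate wid2tid_list 0).foldl (fun acc p =>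
    let wl := PySem.List.pyGetD word_lens p.1 0
    acc ++ [pvPadA ((PySem.List.slice p.2 (some 1) (some (wl + 1))).map
      (fun tids => PySem.List.pyGetD tids 0 0)) max_word_len]) []
  (word_masks, first_ids_list, word_lens)

-- ===== PORT B =====
-- B's recursive helper starts(t, base): the inner 'while j < len(t) and t[j] == t[0]'
-- is the length of the leading run of t[0] in t[1:], i.e. 1 + pvLeadRun t[0] t[1:]
def pvLeadRun (x : Int) : List Int → Nat
  | [] => 0
  | y :: ys => if y = x then 1 + pvLeadRun x ys else 0

def pvStartsB (t : List Int) (base : Int) : List Int :=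
  match t with
  | [] => []
  | x :: rest =>
    let j := 1 + pvLeadRun x rest
    base :: pvStartsB ((x :: rest).drop j) (base + (j : Int))
termination_by t.length
decreasing_by simp

def prepare_word_level_input_alt (attention_mask : List (List Int)) (word_ids : List (List Int)) (tokens : List (List String)) (debug : Bool) : List (List Int) × List (List Int) × List Int :=
  let word_lens := tokens.map (fun h => (h.length : Int))
  let max_word_len := (PySem.List.max? word_lens (fun x => x)).getD 0
  let pad := fun (xs : List Int) => xs ++ List.replicate (max_word_len - (xs.length : Int)).toNat 0
  let word_masks := word_lens.map (fun wl => pad (List.replicate wl.toNat (1 : Int)))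
  let first_ids_list := (word_lens.zip (attention_mask.zip word_ids)).map (fun p =>
    let first_ids := PySem.List.slice
      (pvStartsB (PySem.List.slice p.2.2 none (some p.2.1.sum)) 0) (some 1) (some (p.1 + 1))
    pad first_ids)
  (word_masks, first_ids_list, word_lens)

-- ===== PRECONDITION & SPEC =====
-- wids truncated to the first l subtokens (A's 'if i >= l: break')
def pvTrunc (wids : List Int) (l : Int) : List Int :=
  if l ≤ 0 then [] else wids.take l.toNat

-- number of runs of equal adjacent values (closed-form characterisation used by Pre_)
def pvRunsFrom (p : Int) : List Int → Nat
  | [] => 0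
  | x :: xs => (if x = p then 0 else 1) + pvRunsFrom x xs

def pvRuns : List Int → Nat
  | [] => 0
  | x :: xs => 1 + pvRunsFrom x xs

-- Pre_ is exactly where the Python A returns: debug prints-and-exits, max([]) is a
-- ValueError, unequal lengths fail get_word2token_map's assert, a word_ids row without
-- a matching tokens row is an IndexError, and a sentence whose mask-truncated word_ids
-- has fewer than len(tokens[k])+1 runs (unless tokens[k] is empty) fails A's assert.
def Pre_prepare_word_level_input (attention_mask : List (List Int)) (word_ids : List (List Int)) (tokens : List (List String)) (debug : Bool) : Prop :=
  debug = false ∧ tokens ≠ [] ∧ attention_mask.length = word_ids.length ∧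
  word_ids.length ≤ tokens.length ∧
  ∀ k < word_ids.length, (tokens.getD k []).length = 0 ∨
    (tokens.getD k []).length + 1 ≤ pvRuns (pvTrunc (word_ids.getD k []) ((attention_mask.getD k []).sum))
instance (attention_mask : List (List Int)) (word_ids : List (List Int)) (tokens : List (List String)) (debug : Bool) : Decidable (Pre_prepare_word_level_input attention_mask word_ids tokens debug) := by unfold Pre_prepare_word_level_input; infer_instance

def pvWitness_prepare_word_level_input : List (List Int) × List (List Int) × List (List String) × Bool :=
  ([[1, 1, 1]], [[0, 1, 1]], [["a"]], false)

def Spec_prepare_word_level_input (attention_mask : List (List Int)) (word_ids : List (List Int)) (tokens : List (List String)) (debug : Bool) (out : List (List Int) × List (List Int) × List Int) : Prop := out = prepare_word_level_input_alt attention_mask word_ids tokens debug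
instance (attention_mask : List (List Int)) (word_ids : List (List Int)) (tokens : List (List String)) (debug : Bool) (out : List (List Int) × List (List Int) × List Int) : Decidable (Spec_prepare_word_level_input attention_mask word_ids tokens debug out) := by unfold Spec_prepare_word_level_input; infer_instance

-- ===== CLAIM (what is proved, stated in full; the proofs are below) =====
def Claim_equal_prepare_word_level_input : Prop := ∀ (attention_mask : List (List Int)) (word_ids : List (List Int)) (tokens : List (List String)) (debug : Bool), Dom_prepare_word_level_input attention_mask word_ids tokens debug → Pre_prepare_word_level_input attention_mask word_ids tokens debug → Spec_prepare_word_level_input attention_mask word_ids tokens debug (prepare_word_level_input attention_mask word_ids tokens debug)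

-- ===== LEMMAS AND PROOFS =====

theorem pvWitness_ok :
    Dom_prepare_word_level_input pvWitness_prepare_word_level_input.1 pvWitness_prepare_word_level_input.2.1 pvWitness_prepare_word_level_input.2.2.1 pvWitness_prepare_word_level_input.2.2.2 ∧
    Pre_prepare_word_level_input pvWitness_prepare_word_level_input.1 pvWitness_prepare_word_level_input.2.1 pvWitness_prepare_word_level_input.2.2.1 pvWitness_prepare_word_level_input.2.2.2 := by
  constructor <;> decide

-- A's while-padding loop appends zeros up to length m
theorem pvPadA_eq (xs : List Int) (m : Int) :
    pvPadA xs m = xs ++ List.replicate (m - xs.length).toNat 0 := by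
  fun_induction pvPadA xs m with
  | case1 xs h ih =>
    rw [ih]
    have h1 : (m - xs.length).toNat = (m - (xs ++ [(0:Int)]).length).toNat + 1 := by
      simp at h ⊢; omega
    rw [h1, List.replicate_succ]
    simp
  | case2 xs h =>
    have h1 : (m - xs.length).toNat = 0 := by simp at h; omega
    simp [h1]

-- shared per-sentence spec: run-start indices of xs, counting from k, previous value p
def pvStartsFrom (k p : Int) : List Int → List Int
  | [] => []
  | x :: xs => (if x = p then [] else [k]) ++ pvStartsFrom (k + 1) x xs

def pvStarts : List Int → List Int
  | [] => []
  | x :: xs => 0 :: pvStartsFrom 1 x xs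

-- heads of A's groups = run-start indices (continuation case)
theorem pvGroupLoop_heads (xs : List Int) (l : Int) :
    ∀ (s : Int) (acc : List (List Int)) (p : Int), acc ≠ [] → (∀ g ∈ acc, g ≠ []) →
    (pvGroupLoop l (PySem.List.enumerate xs s) acc (some p)).map (fun g => PySem.List.pyGetD g 0 0)
      = acc.map (fun g => PySem.List.pyGetD g 0 0) ++
        pvStartsFrom s p (xs.take (l - s).toNat) := by
  induction xs with
  | nil => intro s acc p hacc hg; simp [PySem.List.enumerate_nil, pvGroupLoop, pvStartsFrom]
  | cons x xs ih =>
    intro s acc p hacc hg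
    rw [PySem.List.enumerate_cons]
    by_cases hls : l ≤ s
    · have h0 : (l - s).toNat = 0 := by omega
      simp [pvGroupLoop, hls, h0, pvStartsFrom]
    · have htake : (x :: xs).take (l - s).toNat = x :: xs.take (l - (s + 1)).toNat := by
        have : (l - s).toNat = (l - (s + 1)).toNat + 1 := by omega
        simp [this]
      rw [htake]
      by_cases hxp : x = p
      · have hcond : (acc.isEmpty || !(some x == some p)) = false := by
          cases acc with
          | nil => exact absurd rfl hacc
          | cons a as => simp [hxp]
        simp only [pvGroupLoop, if_neg (by omega : ¬ l ≤ s), hcond, Bool.false_eq_true,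
          if_false]
        obtain ⟨init, g, hacc'⟩ : ∃ init g, acc = init ++ [g] :=
          ⟨acc.dropLast, acc.getLast hacc, (List.dropLast_concat_getLast hacc).symm⟩
        have hgne : g ≠ [] := hg g (by simp [hacc'])
        have hlast : acc.getLast?.getD [] = g := by simp [hacc']
        have hdrop : acc.dropLast = init := by simp [hacc']
        rw [hlast, hdrop,
          ih (s + 1) (init ++ [g ++ [s]]) p (by simp) (by
            intro g' hg'
            rcases List.mem_append.1 hg' with h1 | h1
            · exact hg g' (by simp [hacc', h1])
            · simp at h1; subst h1; simp [hgne])]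
        have hhd : PySem.List.pyGetD (g ++ [s]) 0 0 = PySem.List.pyGetD g 0 0 := by
          cases g with
          | nil => exact absurd rfl hgne
          | cons a as => simp [PySem.List.pyGetD_zero_cons]
        simp [hacc', hhd, pvStartsFrom, hxp]
      · have hcond : (acc.isEmpty || !(some x == some p)) = true := by simp [hxp]
        simp only [pvGroupLoop, if_neg (by omega : ¬ l ≤ s), hcond, if_true]
        rw [ih (s + 1) (acc ++ [[s]]) x (by simp) (by
            intro g' hg'
            rcases List.mem_append.1 hg' with h1 | h1
            · exact hg g' h1
            · simp at h1; subst h1; simp)]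
        simp [pvStartsFrom, hxp, PySem.List.pyGetD_zero_cons]

theorem pvGroupLoop_heads_top (wids : List Int) (l : Int) :
    (pvGroupLoop l (PySem.List.enumerate wids 0) [] none).map (fun g => PySem.List.pyGetD g 0 0)
      = pvStarts (pvTrunc wids l) := by
  cases wids with
  | nil =>
    simp only [PySem.List.enumerate_nil, pvGroupLoop, List.map_nil]
    unfold pvTrunc
    split <;> simp [pvStarts]
  | cons x xs =>
    rw [PySem.List.enumerate_cons]
    by_cases hl : l ≤ 0
    · simp [pvGroupLoop, hl, pvTrunc, pvStarts]
    · have hcond : (([] : List (List Int)).isEmpty || !(some x == none)) = true := by simp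
      simp only [pvGroupLoop, if_neg hl, hcond, if_true, List.nil_append]
      rw [pvGroupLoop_heads xs l (0 + 1) [[0]] x (by simp) (by simp)]
      have htr : pvTrunc (x :: xs) l = x :: xs.take (l - (0 + 1)).toNat := by
        have h1 : l.toNat = (l - (0 + 1)).toNat + 1 := by omega
        unfold pvTrunc
        rw [if_neg hl, h1, List.take_succ_cons]
      rw [htr]
      have h0 : PySem.List.pyGetD ([0] : List Int) 0 0 = 0 := rfl
      simp only [List.map_cons, List.map_nil, h0, pvStarts, List.cons_append,
        List.nil_append, zero_add]

-- the element after a leading run differs from the run's value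
theorem pvLeadRun_drop (x : Int) (xs : List Int) :
    ∀ y ys, xs.drop (pvLeadRun x xs) = y :: ys → y ≠ x := by
  induction xs with
  | nil => intro y ys h; simp at h
  | cons z zs ih =>
    intro y ys h
    by_cases hz : z = x
    · rw [pvLeadRun, if_pos hz, Nat.add_comm 1 (pvLeadRun x zs), List.drop_succ_cons] at h
      exact ih y ys h
    · rw [pvLeadRun, if_neg hz, List.drop_zero] at h
      cases h; exact hz

-- pvStartsFrom skips a leading run of the previous value
theorem pvStartsFrom_skip (xs : List Int) (x k : Int) :
    pvStartsFrom k x xs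
      = pvStartsFrom (k + (pvLeadRun x xs : Int)) x (xs.drop (pvLeadRun x xs)) := by
  induction xs generalizing k with
  | nil => simp [pvLeadRun]
  | cons y ys ih =>
    by_cases hy : y = x
    · rw [pvLeadRun, if_pos hy, Nat.add_comm 1 (pvLeadRun x ys), List.drop_succ_cons]
      rw [pvStartsFrom, if_pos hy, List.nil_append, hy, ih (k + 1)]
      have hc : k + 1 + (pvLeadRun x ys : Int) = k + ((pvLeadRun x ys + 1 : Nat) : Int) := by
        push_cast; ring
      rw [hc]
    · rw [pvLeadRun, if_neg hy, List.drop_zero]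
      norm_num

-- B's recursive run-splitting helper computes exactly the run-start indices
theorem pvStartsB_eq (t : List Int) (base : Int) :
    pvStartsB t base = match t with
      | [] => []
      | x :: xs => base :: pvStartsFrom (base + 1) x xs := by
  fun_induction pvStartsB t base with
  | case1 => rfl
  | case2 base x rest j ih =>
    have hj : j = 1 + pvLeadRun x rest := rfl
    have hdrop : (x :: rest).drop (1 + pvLeadRun x rest) = rest.drop (pvLeadRun x rest) := by
      rw [Nat.add_comm, List.drop_succ_cons]
    show base :: pvStartsB ((x :: rest).drop j) (base + (j : Int))
        = base :: pvStartsFrom (base + 1) x rest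
    rw [hj] at ih ⊢
    rw [hdrop] at ih ⊢
    rw [pvStartsFrom_skip rest x (base + 1)]
    rcases hres : rest.drop (pvLeadRun x rest) with _ | ⟨y, ys⟩
    · rw [hres] at ih
      simp [pvStartsB, pvStartsFrom]
    · have hyx : y ≠ x := pvLeadRun_drop x rest y ys hres
      rw [hres] at ih
      have ih' : pvStartsB (y :: ys) (base + ((1 + pvLeadRun x rest : Nat) : Int))
          = (base + ((1 + pvLeadRun x rest : Nat) : Int))
            :: pvStartsFrom (base + ((1 + pvLeadRun x rest : Nat) : Int) + 1) y ys := ih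
      rw [ih', pvStartsFrom, if_neg hyx]
      have hc : base + ((1 + pvLeadRun x rest : Nat) : Int)
          = base + 1 + (pvLeadRun x rest : Int) := by push_cast; ring
      simp only [hc, List.cons_append, List.nil_append]

theorem pvStartsB_starts (t : List Int) : pvStartsB t 0 = pvStarts t := by
  rw [pvStartsB_eq]
  cases t with
  | nil => rfl
  | cons x xs => simp [pvStarts]

theorem pv_slice_map_comm {α β : Type} (f : α → β) (xs : List α) (a b : Int)
    (ha : 0 ≤ a) (hb : 0 ≤ b) :
    PySem.List.slice (xs.map f) (some a) (some b)
      = (PySem.List.slice xs (some a) (some b)).map f := by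
  rw [PySem.List.slice_toNat (xs.map f) ha hb, PySem.List.slice_toNat xs ha hb,
    List.map_take, List.map_drop]

theorem prepare_word_level_input_spec : Claim_equal_prepare_word_level_input := by
  intro am wi tk debug hdom hpre
  obtain ⟨hdbg, htk, hlen, hle, hass⟩ := hpre
  unfold Spec_prepare_word_level_input
  unfold prepare_word_level_input prepare_word_level_input_alt pvGetWord2tokenMap
  simp only [Prod.mk.injEq]
  refine ⟨?_, ?_, trivial⟩
  · -- word_masks
    rw [PySem.List.foldl_append_singleton_eq_map, List.nil_append]
    apply List.map_congr_left
    intro wl hwl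
    obtain ⟨h, -, rfl⟩ := List.mem_map.1 hwl
    rw [PySem.List.pyRange_zero_natCast, List.map_map]
    simp only [Function.comp_def, List.map_const', List.length_range]
    rw [pvPadA_eq]
    simp
  · -- first_ids_list
    rw [PySem.List.foldl_append_singleton_eq_map, List.nil_append]
    apply List.ext_getElem
    · simp [PySem.List.length_enumerate, List.length_zip, hlen]
      omega
    · intro k hk1 hk2
      have hkw : k < wi.length := by
        simpa [PySem.List.length_enumerate, List.length_zip, hlen] using hk1
      have hka : k < am.length := by omega
      have hktk : k < tk.length := by omega
      simp only [List.getElem_map, PySem.List.getElem_enumerate, List.getElem_zip,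
        zero_add]
      have hwl : PySem.List.pyGetD (tk.map (fun h => (h.length : Int))) (k : Int) 0
          = ((tk[k]'hktk).length : Int) := by
        rw [PySem.List.pyGetD_natCast]
        rw [List.getD_eq_getElem?_getD, List.getElem?_map, List.getElem?_eq_getElem hktk]
        rfl
      set n : Nat := (tk[k]'hktk).length with hn
      set wk : List Int := wi[k]'hkw with hwk
      set l : Int := (am[k]'hka).sum with hl
      rw [hwl]
      rw [← pv_slice_map_comm (fun tids => PySem.List.pyGetD tids 0 0)
        (pvGroupLoop l (PySem.List.enumerate wk) [] none) 1 ((n : Int) + 1)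
        (by norm_num) (by positivity)]
      rw [pvGroupLoop_heads_top wk l, pvStartsB_starts]
      by_cases hl0 : 0 < l
      · -- slice wk [:l] = pvTrunc wk l, then the two sides are literally the same pad
        have ht : PySem.List.slice wk none (some l) = pvTrunc wk l := by
          rw [PySem.List.slice_to wk (by omega)]
          unfold pvTrunc
          rw [if_neg (by omega)]
        rw [ht, pvPadA_eq]
      · -- l ≤ 0: A truncates to [], so Pre_'s assert forces n = 0 and both sides are pads of []
        have hass' := hass k hkw
        have hgetD_tk : tk.getD k [] = tk[k]'hktk := List.getD_eq_getElem tk [] hktk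
        have hgetD_wi : wi.getD k [] = wk := List.getD_eq_getElem wi [] hkw
        have hgetD_am : am.getD k [] = am[k]'hka := List.getD_eq_getElem am [] hka
        rw [hgetD_tk, hgetD_wi, hgetD_am, ← hn, ← hl] at hass'
        have htr : pvTrunc wk l = [] := by unfold pvTrunc; rw [if_pos (by omega)]
        have hn0 : n = 0 := by
          rcases hass' with h | h
          · exact h
          · rw [htr] at h; simp [pvRuns] at h
      -- both slices [1:1] are empty
        rw [htr, hn0]
        simp only [Nat.cast_zero]
        have hsliceA : PySem.List.slice (pvStarts ([] : List Int)) (some 1) (some ((0:Int) + 1)) = [] := by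
          decide
        have hsliceB : PySem.List.slice (pvStarts (PySem.List.slice wk none (some l)))
            (some 1) (some ((0:Int) + 1)) = [] := by
          rw [PySem.List.slice_toNat _ (by norm_num) (by norm_num)]
          norm_num
        rw [hsliceA, hsliceB, pvPadA_eq]
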